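-- pv_equiv track=rewrite | github.com/wonhyukchoi/biquasiles | biquasiles.py | lexinc
-- ===== SOURCE A (Python) =====
-- def lexinc(v,n):
--     ### increment in dictionary order mod n###
--     p = len(v)-1
--     while p != -1 and v[p] == n-1:
--         p = p-1
--     if p == -1:
--         return False
--     else:
--         w = list(v)
--         w[p] = w[p]+1 % n
--         for j in range(p+1,len(w)):
--             w[j] = 0
--     return w
-- ===== SOURCE B (Python) =====
-- def lexinc(v, n):
--     # Recursive decomposition: peel the last digit; if it can be bumped, bump it
--     # (keeping A's literal expression `+ 1 % n`), otherwise recurse on the prefix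
--     # and append a 0.  No mutation, result built by concatenation.
--     if not v:
--         return False
--     last = v[-1]
--     if last != n - 1:
--         return v[:-1] + [last + 1 % n]
--     r = lexinc(v[:-1], n)
--     return False if r is False else r + [0]
-- ===== Notes on version B (the rewrite author's own statement) =====
-- stated objective: alternative
-- what changed: Replaces A's iterative two-phase mutation (backward index scan for the pivot, then copy, in-place set and an index loop zeroing the suffix) with a structural recursion on the list that peels the last digit and rebuilds the result purely by concatenation, with no index arithmetic and no mutation.
-- outside the precondition, e.g. on lexinc([], 0): A returns False, B returns False; on lexinc([1, 1], 2): A returns False, B returns False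
import Mathlib
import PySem

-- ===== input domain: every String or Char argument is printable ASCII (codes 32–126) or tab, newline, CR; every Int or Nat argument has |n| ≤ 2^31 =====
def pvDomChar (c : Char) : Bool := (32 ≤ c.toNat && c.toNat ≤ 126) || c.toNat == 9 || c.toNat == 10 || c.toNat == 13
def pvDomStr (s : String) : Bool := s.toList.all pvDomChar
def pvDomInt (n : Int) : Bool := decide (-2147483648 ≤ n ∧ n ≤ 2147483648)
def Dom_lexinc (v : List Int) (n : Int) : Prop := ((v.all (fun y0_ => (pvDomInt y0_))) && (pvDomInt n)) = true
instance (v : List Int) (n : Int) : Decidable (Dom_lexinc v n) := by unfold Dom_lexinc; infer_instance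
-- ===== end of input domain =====

-- B replaces A's iterative two-phase mutation (backward pivot scan, then copy/set and an index loop
-- zeroing the suffix) by a structural recursion peeling the last digit and rebuilding by concatenation;
-- same cost, different decomposition. Return value only (A never mutates v).


-- ===== PORT A =====
-- the 'while p != -1 and v[p] == n-1' loop, with p = k-1; returns the final p (none = -1)
def lexincScan (v : List Int) (n : Int) : Nat → Option Nat
  | 0 => none
  | k + 1 => if PySem.List.pyGet? v (k : Int) = some (n - 1) then lexincScan v n k else some k

def lexinc (v : List Int) (n : Int) : Option (List Int) :=
  match lexincScan v n v.length with
  | none => none        -- return False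
  | some p =>
      -- w = list(v); w[p] = w[p] + 1 % n   (Python precedence: w[p] + (1 % n))
      let w := PySem.List.pySetD v (p : Int) (PySem.List.pyGetD v (p : Int) 0 + PySem.Int.mod 1 n)
      -- for j in range(p+1, len(w)): w[j] = 0
      some ((PySem.List.pyRange ((p : Int) + 1) (w.length : Int) 1).foldl
              (fun acc j => PySem.List.pySetD acc j 0) w)

-- ===== PORT B =====
-- structural recursion of Source B: v[-1] → pyGetD v (-1), v[:-1] → slice v none (some (-1))
def lexinc_alt (v : List Int) (n : Int) : Option (List Int) :=
  if h : v = [] then none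
  else
    let last := PySem.List.pyGetD v (-1) 0
    if last ≠ n - 1 then
      some (PySem.List.slice v none (some (-1)) ++ [last + PySem.Int.mod 1 n])
    else
      (lexinc_alt (PySem.List.slice v none (some (-1))) n).map (fun t => t ++ [0])
termination_by v.length
decreasing_by
  have hv : 0 < v.length := List.length_pos_iff.mpr h
  simp [PySem.List.slice_to_neg_one, List.length_dropLast]; omega

-- ===== PRECONDITION & SPEC =====
-- Pre_ excludes (a) the inputs where Python A raises ZeroDivisionError (n = 0 while some element differs
-- from n-1; B raises there too), and (b) the inputs where A returns False, a value outside the declared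
-- return type Optional[list[int]] (every element equal to n-1, including empty v); both ports return none there.
def Pre_lexinc (v : List Int) (n : Int) : Prop := n ≠ 0 ∧ ∃ x ∈ v, x ≠ n - 1
instance (v : List Int) (n : Int) : Decidable (Pre_lexinc v n) := by unfold Pre_lexinc; infer_instance
def pvWitness_lexinc : List Int × Int := ([0, 1], 2)

def Spec_lexinc (v : List Int) (n : Int) (out : Option (List Int)) : Prop := out = lexinc_alt v n
instance (v : List Int) (n : Int) (out : Option (List Int)) : Decidable (Spec_lexinc v n out) := by unfold Spec_lexinc; infer_instance

-- ===== CLAIM (what is proved, stated in full; the proofs are below) =====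
def Claim_equal_lexinc : Prop := ∀ (v : List Int) (n : Int), Dom_lexinc v n → Pre_lexinc v n → Spec_lexinc v n (lexinc v n)

-- ===== LEMMAS AND PROOFS =====

-- the scan never looks past index k, so a trailing element is irrelevant
theorem lexincScan_append (ys : List Int) (x n : Int) (k : Nat) (hk : k ≤ ys.length) :
    lexincScan (ys ++ [x]) n k = lexincScan ys n k := by
  induction k with
  | zero => rfl
  | succ k ih =>
      have hk' : k < ys.length := by omega
      simp only [lexincScan, PySem.List.pyGet?_natCast,
        List.getElem?_append_left hk', ih (by omega)]

theorem lexincScan_lt (v : List Int) (n : Int) (k p : Nat)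
    (h : lexincScan v n k = some p) : p < k := by
  induction k with
  | zero => simp [lexincScan] at h
  | succ k ih =>
      simp only [lexincScan] at h
      split at h
      · exact Nat.lt_succ_of_lt (ih h)
      · injection h with h; omega

-- the zeroing fold preserves length
theorem length_foldl_pySetD (l : List Int) (a : List Int) :
    (l.foldl (fun acc j => PySem.List.pySetD acc j (0 : Int)) a).length = a.length := by
  induction l generalizing a with
  | nil => rfl
  | cons j l ih => simp [List.foldl_cons, ih, PySem.List.length_pySetD]

-- the zeroing fold, when every index hits the front part, commutes with appending one element
theorem foldl_pySetD_append (l : List Int) (a : List Int) (x : Int)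
    (h : ∀ j ∈ l, 0 ≤ j ∧ j < (a.length : Int)) :
    l.foldl (fun acc j => PySem.List.pySetD acc j (0 : Int)) (a ++ [x]) =
      (l.foldl (fun acc j => PySem.List.pySetD acc j (0 : Int)) a) ++ [x] := by
  induction l generalizing a with
  | nil => rfl
  | cons j l ih =>
      obtain ⟨h0, hlt⟩ := h j (by simp)
      have hset : PySem.List.pySetD (a ++ [x]) j (0 : Int) = PySem.List.pySetD a j 0 ++ [x] := by
        rw [PySem.List.pySetD_of_nonneg _ _ h0, PySem.List.pySetD_of_nonneg _ _ h0,
          List.set_append_left _ _ (by omega : j.toNat < a.length)]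
      simp only [List.foldl_cons, hset]
      exact ih _ (fun i hi => by
        have := h i (by simp [hi])
        simpa [PySem.List.length_pySetD] using this)

-- A's right-recursion equations ------------------------------------------------
theorem lexinc_nil (n : Int) : lexinc [] n = none := rfl

theorem lexinc_append (ys : List Int) (x n : Int) :
    lexinc (ys ++ [x]) n =
      if x = n - 1 then (lexinc ys n).map (fun t => t ++ [0])
      else some (ys ++ [x + PySem.Int.mod 1 n]) := by
  have hget : PySem.List.pyGet? (ys ++ [x]) ((ys.length : Nat) : Int) = some x := by
    simpa using PySem.List.pyGet?_append_length (pre := ys) (y := x) (ys := [])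
  have hlen : (ys ++ [x]).length = ys.length + 1 := by simp
  by_cases hx : x = n - 1
  · -- scan skips x, then behaves like the scan of ys
    subst hx
    have hscan : lexincScan (ys ++ [n - 1]) n (ys.length + 1) = lexincScan ys n ys.length := by
      simp only [lexincScan, hget, if_pos rfl]
      exact lexincScan_append ys (n - 1) n ys.length le_rfl
    unfold lexinc
    rw [show (ys ++ [n - 1]).length = ys.length + 1 from hlen, hscan, if_pos rfl]
    cases hres : lexincScan ys n ys.length with
    | none => simp
    | some p =>
        have hp : p < ys.length := lexincScan_lt ys n ys.length p hres
        simp only [Option.map_some]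
        congr 1
        have hgd : PySem.List.pyGetD (ys ++ [n - 1]) ((p : Nat) : Int) 0 =
            PySem.List.pyGetD ys ((p : Nat) : Int) 0 := by
          simp [List.getD, List.getElem?_append_left hp]
        have hsetp : PySem.List.pySetD (ys ++ [n - 1]) ((p : Nat) : Int)
              (PySem.List.pyGetD (ys ++ [n - 1]) ((p : Nat) : Int) 0 + PySem.Int.mod 1 n) =
            PySem.List.pySetD ys ((p : Nat) : Int)
              (PySem.List.pyGetD ys ((p : Nat) : Int) 0 + PySem.Int.mod 1 n) ++ [n - 1] := by
          rw [hgd, PySem.List.pySetD_natCast, PySem.List.pySetD_natCast,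
            List.set_append_left _ _ hp]
        set a := PySem.List.pySetD ys ((p : Nat) : Int)
            (PySem.List.pyGetD ys ((p : Nat) : Int) 0 + PySem.Int.mod 1 n) with ha
        have hla : a.length = ys.length := by rw [ha]; exact PySem.List.length_pySetD ..
        rw [hsetp]
        have hlaw : ((a ++ [n - 1]).length : Int) = (a.length : Int) + 1 := by simp
        rw [hlaw, hla,
          PySem.List.pyRange_one_succ_right (by exact_mod_cast Int.ofNat_le.mpr hp),
          List.foldl_append]
        have hidx : ∀ j ∈ PySem.List.pyRange ((p : Int) + 1) (ys.length : Int) 1,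
            0 ≤ j ∧ j < (a.length : Int) := by
          intro j hj
          rw [PySem.List.mem_pyRange_one] at hj
          constructor <;> [omega; (rw [hla]; omega)]
        rw [foldl_pySetD_append _ _ _ hidx]
        simp only [List.foldl]
        set b := (PySem.List.pyRange ((p : Int) + 1) (ys.length : Int) 1).foldl
            (fun acc j => PySem.List.pySetD acc j (0 : Int)) a with hb
        have hlb : b.length = ys.length := by rw [hb, length_foldl_pySetD, hla]
        rw [show ((ys.length : Nat) : Int) = ((b.length : Nat) : Int) by rw [hlb],
          PySem.List.pySetD_natCast]
        rw [List.set_append_right _ _ (le_refl b.length)]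
        simp [hla]
  · -- scan stops at the last element
    have hscan : lexincScan (ys ++ [x]) n (ys.length + 1) = some ys.length := by
      simp only [lexincScan, hget]
      rw [if_neg (by simpa using hx)]
    unfold lexinc
    rw [hlen, hscan, if_neg hx]
    simp only []
    have hgd : PySem.List.pyGetD (ys ++ [x]) ((ys.length : Nat) : Int) 0 = x := by
      simp [List.getD]
    rw [hgd, PySem.List.pySetD_natCast, List.set_append_right _ _ (le_refl ys.length)]
    simp only [Nat.sub_self, List.set_cons_zero]
    have : ((ys ++ [x + PySem.Int.mod 1 n]).length : Int) = (ys.length : Int) + 1 := by simp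
    rw [this, PySem.List.pyRange_one_eq_nil (by omega)]
    rfl

-- B's right-recursion equations ------------------------------------------------
theorem lexinc_alt_nil (n : Int) : lexinc_alt [] n = none := by
  rw [lexinc_alt]; rfl

theorem lexinc_alt_append (ys : List Int) (x n : Int) :
    lexinc_alt (ys ++ [x]) n =
      if x = n - 1 then (lexinc_alt ys n).map (fun t => t ++ [0])
      else some (ys ++ [x + PySem.Int.mod 1 n]) := by
  rw [lexinc_alt]
  have hne : ys ++ [x] ≠ [] := by simp
  rw [dif_neg hne]
  simp only [PySem.List.pyGetD_neg_one_append_singleton, PySem.List.slice_to_neg_one,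
    List.dropLast_concat]
  by_cases hx : x = n - 1
  · rw [if_neg (by simpa using hx), if_pos hx]
  · rw [if_pos hx, if_neg hx]

-- the two ports agree on every input (even where Python would raise, both ports are total)
theorem lexinc_eq (v : List Int) (n : Int) : lexinc v n = lexinc_alt v n := by
  induction v using List.reverseRecOn with
  | nil => rw [lexinc_nil, lexinc_alt_nil]
  | append_singleton ys x ih =>
      rw [lexinc_append, lexinc_alt_append, ih]

-- ===== VERDICT (by name: the statement is the Claim_ definition above) =====
theorem lexinc_spec : Claim_equal_lexinc := by
  intro v n _ _
  unfold Spec_lexinc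
  exact lexinc_eq v n
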